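-- pv_equiv track=rewrite | github.com/Karanveer266/adobe-hackathon-1B-final | all_code.py | _determine_experience_level
-- ===== SOURCE A (Python) =====
-- def _determine_experience_level(persona: str) -> str:
--     """Determine experience level from persona description"""
--     persona_lower = persona.lower()
--
--     if any(term in persona_lower for term in ['senior', 'lead', 'director', 'manager', 'expert']):
--         return 'Expert'
--     elif any(term in persona_lower for term in ['professional', 'specialist', 'coordinator']):
--         return 'Advanced'
--     elif any(term in persona_lower for term in ['junior', 'entry', 'new', 'beginner']):
--         return 'Beginner'
--     else:
--         return 'Intermediate'
-- ===== SOURCE B (Python) =====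
-- def _determine_experience_level(persona: str) -> str:
--     """Determine experience level from persona description"""
--     p = persona.lower()
--     ranks = {'senior': 0, 'lead': 0, 'director': 0, 'manager': 0, 'expert': 0,
--              'professional': 1, 'specialist': 1, 'coordinator': 1,
--              'junior': 2, 'entry': 2, 'new': 2, 'beginner': 2}
--     best = 3
--     for term, rank in ranks.items():
--         if term in p and rank < best:
--             best = rank
--     return ('Expert', 'Advanced', 'Beginner', 'Intermediate')[best]
-- ===== Notes on version B (the rewrite author's own statement) =====
-- stated objective: alternative
-- what changed: Replaces the prioritized if/elif group checks with a flat keyword-to-rank map and a single min-rank accumulator pass over all keywords, then indexes the resulting best rank into a level tuple.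
import Mathlib
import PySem

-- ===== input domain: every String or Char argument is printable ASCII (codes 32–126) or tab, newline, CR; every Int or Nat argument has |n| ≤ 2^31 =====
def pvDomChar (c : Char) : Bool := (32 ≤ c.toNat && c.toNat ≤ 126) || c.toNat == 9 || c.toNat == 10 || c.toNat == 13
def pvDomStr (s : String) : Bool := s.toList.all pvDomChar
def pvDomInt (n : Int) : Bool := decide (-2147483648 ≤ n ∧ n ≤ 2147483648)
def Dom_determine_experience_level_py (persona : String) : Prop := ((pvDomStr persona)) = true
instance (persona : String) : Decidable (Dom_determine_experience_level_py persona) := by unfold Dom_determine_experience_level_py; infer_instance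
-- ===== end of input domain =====

-- B replaces A's prioritized if/elif chain with a flat keyword->rank map, a single min-rank
-- accumulator pass, and a final index into a level table (objective: alternative).


-- ===== PORT A =====
def determine_experience_level_py (persona : String) : String :=
  let persona_lower := PySem.Str.lower persona
  if ["senior", "lead", "director", "manager", "expert"].any
      (fun term => PySem.Str.isIn term persona_lower) then "Expert"
  else if ["professional", "specialist", "coordinator"].any
      (fun term => PySem.Str.isIn term persona_lower) then "Advanced"
  else if ["junior", "entry", "new", "beginner"].any
      (fun term => PySem.Str.isIn term persona_lower) then "Beginner"
  else "Intermediate"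

-- ===== PORT B =====
-- flat keyword -> rank map (insertion order of Source B's dict)
def pvRanks : List (String × Nat) :=
  [("senior", 0), ("lead", 0), ("director", 0), ("manager", 0), ("expert", 0),
   ("professional", 1), ("specialist", 1), ("coordinator", 1),
   ("junior", 2), ("entry", 2), ("new", 2), ("beginner", 2)]

def determine_experience_level_py_alt (persona : String) : String :=
  let p := PySem.Str.lower persona
  let best := pvRanks.foldl
    (fun best tr => if PySem.Str.isIn tr.1 p && decide (tr.2 < best) then tr.2 else best) 3
  -- best is always < 4, so the tuple index never goes out of range
  ["Expert", "Advanced", "Beginner", "Intermediate"].getD best "Intermediate"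

-- ===== PRECONDITION & SPEC =====
def Spec_determine_experience_level_py (persona : String) (out : String) : Prop := out = determine_experience_level_py_alt persona
instance (persona : String) (out : String) : Decidable (Spec_determine_experience_level_py persona out) := by unfold Spec_determine_experience_level_py; infer_instance

-- ===== CLAIM =====
def Claim_equal_determine_experience_level_py : Prop := ∀ (persona : String), Dom_determine_experience_level_py persona → Spec_determine_experience_level_py persona (determine_experience_level_py persona)

-- ===== LEMMAS AND PROOFS =====

-- proof helper: one step of B's min-rank fold, with the membership test abstracted to a Bool
def pvStep (r : Nat) (b : Bool) (best : Nat) : Nat :=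
  if b && decide (r < best) then r else best

theorem pvFold_eq (p : String) :
    pvRanks.foldl
      (fun best tr => if PySem.Str.isIn tr.1 p && decide (tr.2 < best) then tr.2 else best) 3 =
    pvStep 2 (PySem.Str.isIn "beginner" p) (pvStep 2 (PySem.Str.isIn "new" p)
      (pvStep 2 (PySem.Str.isIn "entry" p) (pvStep 2 (PySem.Str.isIn "junior" p)
      (pvStep 1 (PySem.Str.isIn "coordinator" p) (pvStep 1 (PySem.Str.isIn "specialist" p)
      (pvStep 1 (PySem.Str.isIn "professional" p) (pvStep 0 (PySem.Str.isIn "expert" p)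
      (pvStep 0 (PySem.Str.isIn "manager" p) (pvStep 0 (PySem.Str.isIn "director" p)
      (pvStep 0 (PySem.Str.isIn "lead" p) (pvStep 0 (PySem.Str.isIn "senior" p) 3))))))))))) := rfl

theorem pvL0 : ∀ (b1 b2 b3 b4 b5 : Bool),
    pvStep 0 b5 (pvStep 0 b4 (pvStep 0 b3 (pvStep 0 b2 (pvStep 0 b1 3)))) =
      if b1 || (b2 || (b3 || (b4 || b5))) then 0 else 3 := by decide

theorem pvL1 : ∀ (b6 b7 b8 : Bool),
    pvStep 1 b8 (pvStep 1 b7 (pvStep 1 b6 0)) = 0 ∧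
    pvStep 1 b8 (pvStep 1 b7 (pvStep 1 b6 3)) = if b6 || (b7 || b8) then 1 else 3 := by decide

theorem pvL2 : ∀ (b9 b10 b11 b12 : Bool),
    pvStep 2 b12 (pvStep 2 b11 (pvStep 2 b10 (pvStep 2 b9 0))) = 0 ∧
    pvStep 2 b12 (pvStep 2 b11 (pvStep 2 b10 (pvStep 2 b9 1))) = 1 ∧
    pvStep 2 b12 (pvStep 2 b11 (pvStep 2 b10 (pvStep 2 b9 3))) =
      if b9 || (b10 || (b11 || b12)) then 2 else 3 := by decide

theorem pvChain_eq (b1 b2 b3 b4 b5 b6 b7 b8 b9 b10 b11 b12 : Bool) :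
    pvStep 2 b12 (pvStep 2 b11 (pvStep 2 b10 (pvStep 2 b9 (pvStep 1 b8 (pvStep 1 b7
      (pvStep 1 b6 (pvStep 0 b5 (pvStep 0 b4 (pvStep 0 b3 (pvStep 0 b2 (pvStep 0 b1 3))))))))))) =
    if b1 || (b2 || (b3 || (b4 || b5))) then 0
    else if b6 || (b7 || b8) then 1
    else if b9 || (b10 || (b11 || b12)) then 2
    else 3 := by
  rw [pvL0 b1 b2 b3 b4 b5]
  cases b1 || (b2 || (b3 || (b4 || b5)))
  case true =>
    simp only [if_true]
    rw [(pvL1 b6 b7 b8).1, (pvL2 b9 b10 b11 b12).1]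
  case false =>
    simp only [Bool.false_eq_true, if_false]
    rw [(pvL1 b6 b7 b8).2]
    cases b6 || (b7 || b8)
    case true =>
      simp only [if_true]
      rw [(pvL2 b9 b10 b11 b12).2.1]
    case false =>
      simp only [Bool.false_eq_true, if_false]
      rw [(pvL2 b9 b10 b11 b12).2.2]

-- ===== VERDICT =====
theorem determine_experience_level_py_spec : Claim_equal_determine_experience_level_py := by
  intro persona _
  unfold Spec_determine_experience_level_py determine_experience_level_py
    determine_experience_level_py_alt
  simp only [List.any_cons, List.any_nil, Bool.or_false]
  rw [pvFold_eq, pvChain_eq]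
  generalize PySem.Str.isIn "senior" (PySem.Str.lower persona) = b1
  generalize PySem.Str.isIn "lead" (PySem.Str.lower persona) = b2
  generalize PySem.Str.isIn "director" (PySem.Str.lower persona) = b3
  generalize PySem.Str.isIn "manager" (PySem.Str.lower persona) = b4
  generalize PySem.Str.isIn "expert" (PySem.Str.lower persona) = b5
  generalize PySem.Str.isIn "professional" (PySem.Str.lower persona) = b6
  generalize PySem.Str.isIn "specialist" (PySem.Str.lower persona) = b7
  generalize PySem.Str.isIn "coordinator" (PySem.Str.lower persona) = b8
  generalize PySem.Str.isIn "junior" (PySem.Str.lower persona) = b9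
  generalize PySem.Str.isIn "entry" (PySem.Str.lower persona) = b10
  generalize PySem.Str.isIn "new" (PySem.Str.lower persona) = b11
  generalize PySem.Str.isIn "beginner" (PySem.Str.lower persona) = b12
  cases b1 || (b2 || (b3 || (b4 || b5))) <;>
    cases b6 || (b7 || b8) <;>
    cases b9 || (b10 || (b11 || b12)) <;> rfl
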